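-- pv_equiv track=rewrite | github.com/Daniel-Farnham/trading-bot | src/research/world_state.py | _extract_discovery_tickers
-- ===== SOURCE A (Python) =====
-- from collections import defaultdict
--
-- def _extract_discovery_tickers(articles: list[dict], known_tickers: set[str]) -> dict[str, list[dict]]:
--     """Find tickers appearing frequently in news that aren't in our watchlist/holdings.
--
--     Returns dict of ticker -> list of articles, sorted by frequency.
--     """
--     ticker_articles: dict[str, list[dict]] = defaultdict(list)
--     for a in articles:
--         for t in (a.get("tickers") or []):
--             ticker_upper = t.upper()
--             if ticker_upper and ticker_upper not in known_tickers:
--                 ticker_articles[ticker_upper].append(a)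
--     # Only surface tickers with 2+ articles (signal, not noise)
--     return {t: arts for t, arts in sorted(
--         ticker_articles.items(), key=lambda x: -len(x[1])
--     ) if len(arts) >= 2}
-- ===== SOURCE B (Python) =====
-- def _extract_discovery_tickers(articles: list[dict], known_tickers: set[str]) -> dict[str, list[dict]]:
--     # Group via a flattened (TICKER, article) pair stream, then order by a
--     # counting/bucket pass (frequency buckets emitted from the max down to 2)
--     # instead of a comparison sort.
--     pairs = [(t.upper(), a) for a in articles for t in (a.get("tickers") or [])]
--     grouped: dict[str, list[dict]] = {}
--     for tu, a in pairs:
--         if tu and tu not in known_tickers: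
--             grouped.setdefault(tu, []).append(a)
--     buckets: dict[int, list] = {}
--     top = 0
--     for t, arts in grouped.items():
--         buckets.setdefault(len(arts), []).append((t, arts))
--         top = max(top, len(arts))
--     out: dict[str, list[dict]] = {}
--     for f in range(top, 1, -1):
--         for t, arts in buckets.get(f, []):
--             out[t] = arts
--     return out
-- ===== Notes on version B (the rewrite author's own statement) =====
-- stated objective: alternative
-- what changed: Grouping runs over a flattened (ticker, article) pair stream, and the comparison sort sorted(items, key=-len) is replaced by a counting/bucket pass: entries are distributed into frequency buckets in insertion order and emitted from the maximum frequency down to 2, which reproduces descending-frequency order with first-appearance tie-breaking exactly.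
import Mathlib
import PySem

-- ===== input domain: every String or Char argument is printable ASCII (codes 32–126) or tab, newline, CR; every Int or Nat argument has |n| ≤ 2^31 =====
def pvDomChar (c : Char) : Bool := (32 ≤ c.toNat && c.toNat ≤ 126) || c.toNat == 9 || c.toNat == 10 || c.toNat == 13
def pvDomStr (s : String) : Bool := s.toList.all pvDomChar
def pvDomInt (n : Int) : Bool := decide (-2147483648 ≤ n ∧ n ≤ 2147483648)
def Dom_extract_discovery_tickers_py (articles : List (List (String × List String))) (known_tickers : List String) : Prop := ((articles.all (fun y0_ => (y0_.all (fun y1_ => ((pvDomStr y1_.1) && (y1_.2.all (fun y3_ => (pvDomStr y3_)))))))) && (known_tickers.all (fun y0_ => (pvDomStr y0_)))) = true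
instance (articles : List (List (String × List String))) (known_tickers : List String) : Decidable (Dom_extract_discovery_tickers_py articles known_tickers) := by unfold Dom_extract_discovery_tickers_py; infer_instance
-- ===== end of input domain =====

-- B replaces A's comparison sort by a counting/bucket pass (frequency buckets emitted
-- from the maximum down to 2) over a flattened (ticker, article) pair stream: an
-- alternative decomposition with the same exact output.

-- a.get("tickers") or []  — first-match association-list lookup; Python's `or []` turns
-- both a missing key (None) and an empty list into [], which `.getD []` matches exactly.
def pvTickersOf (a : List (String × List String)) : List String :=
  ((PySem.Dict.mk a).get? "tickers").getD []

-- ===== PORT A =====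
def extract_discovery_tickers_py (articles : List (List (String × List String))) (known_tickers : List String) : List (String × List (List (String × List String))) :=
  -- ticker_articles = defaultdict(list); nested for-loops appending a under t.upper()
  let ta : PySem.Dict String (List (List (String × List String))) :=
    articles.foldl (fun d a =>
      (pvTickersOf a).foldl (fun d t =>
        let tu := PySem.Str.upper t
        if tu ≠ "" ∧ tu ∉ known_tickers then d.modify tu [] (· ++ [a]) else d) d)
      PySem.Dict.empty
  -- sorted(ticker_articles.items(), key=lambda x: -len(x[1]))
  let s := PySem.List.sorted ta.items (fun x => -(PySem.List.len x.2)) false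
  -- {t: arts for t, arts in … if len(arts) >= 2}
  (s.foldl (fun d x => if 2 ≤ PySem.List.len x.2 then d.insert x.1 x.2 else d)
    (PySem.Dict.empty : PySem.Dict String (List (List (String × List String))))).items

-- ===== PORT B =====
def extract_discovery_tickers_py_alt (articles : List (List (String × List String))) (known_tickers : List String) : List (String × List (List (String × List String))) :=
  -- pairs = [(t.upper(), a) for a in articles for t in (a.get("tickers") or [])]
  let pairs := articles.flatMap (fun a => (pvTickersOf a).map (fun t => (PySem.Str.upper t, a)))
  -- grouped: one fold over the pair stream (setdefault(…, []).append(a) = modify with default [])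
  let grouped : PySem.Dict String (List (List (String × List String))) :=
    pairs.foldl (fun d p =>
      if p.1 ≠ "" ∧ p.1 ∉ known_tickers then d.modify p.1 [] (· ++ [p.2]) else d)
      PySem.Dict.empty
  -- buckets[len(arts)].append((t, arts)); top = max(top, len(arts))
  let bt := grouped.items.foldl (fun s x =>
      (s.1.modify (PySem.List.len x.2) [] (· ++ [x]), max s.2 (PySem.List.len x.2)))
    ((PySem.Dict.empty : PySem.Dict Int (List (String × List (List (String × List String))))), (0 : Int))
  -- for f in range(top, 1, -1): for t, arts in buckets.get(f, []): out[t] = arts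
  ((PySem.List.pyRange bt.2 1 (-1)).foldl (fun d f =>
      (bt.1.getD f []).foldl (fun d x => d.insert x.1 x.2) d)
    (PySem.Dict.empty : PySem.Dict String (List (List (String × List String))))).items

-- ===== PRECONDITION & SPEC =====
def Spec_extract_discovery_tickers_py (articles : List (List (String × List String))) (known_tickers : List String) (out : List (String × List (List (String × List String)))) : Prop := out = extract_discovery_tickers_py_alt articles known_tickers
instance (articles : List (List (String × List String))) (known_tickers : List String) (out : List (String × List (List (String × List String)))) : Decidable (Spec_extract_discovery_tickers_py articles known_tickers out) := by unfold Spec_extract_discovery_tickers_py; infer_instance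

-- ===== CLAIM (what is proved, stated in full; the proofs are below) =====
def Claim_equal_extract_discovery_tickers_py : Prop := ∀ (articles : List (List (String × List String))) (known_tickers : List String), Dom_extract_discovery_tickers_py articles known_tickers → Spec_extract_discovery_tickers_py articles known_tickers (extract_discovery_tickers_py articles known_tickers)

-- ===== LEMMAS AND PROOFS =====

-- insertBy walks past a prefix it does not insert into
lemma pv_insertBy_append {α : Type} (bef : α → α → Bool) (x : α) (as bs : List α)
    (h : ∀ a ∈ as, bef x a = false) :
    PySem.List.insertBy bef x (as ++ bs) = as ++ PySem.List.insertBy bef x bs := by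
  induction as with
  | nil => rfl
  | cons a t ih =>
    have ha := h a (by simp)
    simp only [List.cons_append, PySem.List.insertBy, ha, Bool.false_eq_true, if_false]
    simp [ih (fun a ha => h a (by simp [ha]))]

-- insertBy puts x in front when the list is empty or starts with a strictly-later element
lemma pv_insertBy_front {α : Type} (bef : α → α → Bool) (x : α) (bs : List α)
    (h : ∀ y ∈ bs, bef x y = true) :
    PySem.List.insertBy bef x bs = x :: bs := by
  cases bs with
  | nil => rfl
  | cons y t => simp [PySem.List.insertBy, h y (by simp)]

-- Python's stable sort as a concatenation of key-value buckets, for any strictly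
-- increasing list of values covering the keys.
lemma pv_sorted_eq_flatMap {α : Type} (key : α → Int) (xs : List α) (vals : List Int)
    (hs : vals.Pairwise (· < ·)) (hmem : ∀ x ∈ xs, key x ∈ vals) :
    PySem.List.sorted xs key false
      = vals.flatMap (fun v => xs.filter (fun x => key x == v)) := by
  induction xs using List.reverseRecOn with
  | nil => simp [PySem.List.sorted]
  | append_singleton xs x ih =>
    have hx : key x ∈ vals := hmem x (by simp)
    obtain ⟨l, r, hv⟩ := List.append_of_mem hx
    subst hv
    have hpl : ∀ a ∈ l, a < key x := by
      rw [List.pairwise_append] at hs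
      exact fun a ha => hs.2.2 a ha (key x) (by simp)
    have hpr : ∀ b ∈ r, key x < b := by
      rw [List.pairwise_append] at hs
      exact (List.pairwise_cons.mp hs.2.1).1
    have ihx := ih (fun y hy => hmem y (by simp [hy]))
    have hstep : PySem.List.sorted (xs ++ [x]) key false
        = PySem.List.insertBy (fun a b => decide (key a < key b)) x (PySem.List.sorted xs key false) := by
      rw [PySem.List.sorted_eq_foldl_insertBy, PySem.List.sorted_eq_foldl_insertBy, List.foldl_append]
      rfl
    rw [hstep, ihx]
    have hfil : ∀ v : Int, (xs ++ [x]).filter (fun y => key y == v)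
        = xs.filter (fun y => key y == v) ++ (if key x == v then [x] else []) := by
      intro v; rw [List.filter_append, List.filter_singleton]; cases h : (key x == v) <;> simp
    -- old buckets
    set ob : Int → List α := fun v => xs.filter (fun y => key y == v) with hob
    have hkey_ob : ∀ v, ∀ a ∈ ob v, key a = v := by
      intro v a ha
      have := List.of_mem_filter ha
      simpa using this
    rw [List.flatMap_append, List.flatMap_cons]
    have h1 : PySem.List.insertBy (fun a b => decide (key a < key b)) x
        ((l.flatMap ob ++ ob (key x)) ++ r.flatMap ob)
        = (l.flatMap ob ++ ob (key x)) ++ (x :: r.flatMap ob) := by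
      rw [pv_insertBy_append]
      · rw [pv_insertBy_front]
        intro y hy
        obtain ⟨v, hvr, hyv⟩ := List.mem_flatMap.mp hy
        have := hkey_ob v y hyv
        simp [this, hpr v hvr]
      · intro a ha
        rcases List.mem_append.mp ha with h | h
        · obtain ⟨v, hvl, hav⟩ := List.mem_flatMap.mp h
          have := hkey_ob v a hav
          simp only [decide_eq_false_iff_not, not_lt, this]
          exact le_of_lt (hpl v hvl)
        · have := hkey_ob (key x) a h
          simp [this]
    rw [← List.append_assoc, h1]
    -- new buckets over l and r are unchanged; the key-x bucket gains [x]
    have hl' : l.flatMap (fun v => (xs ++ [x]).filter (fun y => key y == v)) = l.flatMap ob := by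
      apply List.flatMap_congr
      intro v hvl
      rw [hfil v]
      have : (key x == v) = false := by simp [ne_of_gt (hpl v hvl)]
      simp [this, hob]
    have hr' : r.flatMap (fun v => (xs ++ [x]).filter (fun y => key y == v)) = r.flatMap ob := by
      apply List.flatMap_congr
      intro v hvr
      rw [hfil v]
      have : (key x == v) = false := by simp [ne_of_lt (hpr v hvr)]
      simp [this, hob]
    rw [List.flatMap_append, List.flatMap_cons, hl', hr', hfil (key x)]
    simp [hob]
-- range(top, 1, -1) written out
lemma pv_pyRange_desc (T : Int) :
    PySem.List.pyRange T 1 (-1) = (List.range (T-1).toNat).map (fun k : Nat => T + (-1) * (k:Int)) := by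
  rw [PySem.List.pyRange]
  norm_num
  split_ifs with h
  · have : T.toNat - 1 = (T-1).toNat := by omega
    rw [this]
  · simp [show T.toNat - 1 = 0 by omega]

-- the two grouping passes build the same dict
lemma pv_group_eq (articles : List (List (String × List String))) (known_tickers : List String) :
    (articles.flatMap (fun a => (pvTickersOf a).map (fun t => (PySem.Str.upper t, a)))).foldl
      (fun d p => if p.1 ≠ "" ∧ p.1 ∉ known_tickers then d.modify p.1 [] (· ++ [p.2]) else d)
      (PySem.Dict.empty : PySem.Dict String (List (List (String × List String))))
    = articles.foldl (fun d a =>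
        (pvTickersOf a).foldl (fun d t =>
          let tu := PySem.Str.upper t
          if tu ≠ "" ∧ tu ∉ known_tickers then d.modify tu [] (· ++ [a]) else d) d)
        PySem.Dict.empty := by
  rw [List.foldl_flatMap]
  apply PySem.List.foldl_congr_mem
  intro d a _
  rw [List.foldl_map]

-- the bucket/top fold of B, named for the proofs
def pvBuckets (items : List (String × List (List (String × List String)))) :
    PySem.Dict Int (List (String × List (List (String × List String)))) × Int :=
  items.foldl (fun s x =>
      (s.1.modify (PySem.List.len x.2) [] (· ++ [x]), max s.2 (PySem.List.len x.2)))
    (PySem.Dict.empty, 0)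

-- the heart: comparison-sorted-then-filtered items = buckets emitted from the top frequency down to 2
lemma pv_core (items : List (String × List (List (String × List String)))) :
    ((PySem.List.sorted items (fun x => -(PySem.List.len x.2)) false).foldl
        (fun d x => if 2 ≤ PySem.List.len x.2 then d.insert x.1 x.2 else d)
        (PySem.Dict.empty : PySem.Dict String (List (List (String × List String)))))
    = (PySem.List.pyRange (pvBuckets items).2 1 (-1)).foldl
        (fun d f => ((pvBuckets items).1.getD f []).foldl (fun d x => d.insert x.1 x.2) d)
        (PySem.Dict.empty : PySem.Dict String (List (List (String × List String)))) := by
  unfold pvBuckets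
  rw [PySem.List.foldl_prod_mk
    (fun (d : PySem.Dict Int (List (String × List (List (String × List String))))) x =>
      d.modify (PySem.List.len x.2) [] (· ++ [x]))
    (fun m x => max m (PySem.List.len x.2)) items PySem.Dict.empty 0]
  set T : Int := items.foldl (fun m x => max m (PySem.List.len x.2)) 0 with hT
  have hmax := PySem.List.le_foldl_max_int items (fun x => PySem.List.len x.2) 0
  rw [← hT] at hmax
  -- bucket lookup
  have hbucket : ∀ f : Int,
      (items.foldl (fun d x => d.modify (PySem.List.len x.2) [] (· ++ [x]))
        (PySem.Dict.empty : PySem.Dict Int (List (String × List (List (String × List String)))))).getD f []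
      = items.filter (fun x => PySem.List.len x.2 == f) := by
    intro f
    have hmapfold : items.foldl (fun d x => d.modify (PySem.List.len x.2) [] (· ++ [x]))
        (PySem.Dict.empty : PySem.Dict Int (List (String × List (List (String × List String)))))
        = (items.map (fun x => (PySem.List.len x.2, x))).foldl
            (fun d p => d.modify p.1 [] (· ++ [p.2])) PySem.Dict.empty := by
      rw [List.foldl_map]
    rw [hmapfold]
    rw [PySem.Dict.getD_foldl_modify_append]
    rw [List.filter_map]
    rw [List.map_map]
    simp [pysem, Function.comp_def]
  -- the covering value list
  set R : List Int := (List.range (T-1).toNat).map (fun k : Nat => T + (-1) * (k:Int)) with hRdef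
  have hRmem : ∀ v ∈ R.map Neg.neg, v ≤ -2 ∧ ∃ f ∈ R, v = -f := by
    intro v hv
    obtain ⟨f, hf, rfl⟩ := List.mem_map.mp hv
    refine ⟨?_, f, hf, rfl⟩
    obtain ⟨k, hk, rfl⟩ := List.mem_map.mp hf
    have := List.mem_range.mp hk
    omega
  set vals : List Int := R.map Neg.neg ++ [-1, 0] with hvals
  have hpw : vals.Pairwise (· < ·) := by
    rw [hvals, List.pairwise_append]
    refine ⟨?_, by norm_num, ?_⟩
    · rw [hRdef, List.map_map]
      exact (List.pairwise_lt_range).map _ (by intro a b hab; simp only [Function.comp]; omega)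
    · intro a ha b hb
      have := (hRmem a ha).1
      simp only [List.mem_cons, List.not_mem_nil, or_false] at hb
      rcases hb with rfl | rfl <;> omega
  have hcov : ∀ x ∈ items, -(PySem.List.len x.2) ∈ vals := by
    intro x hx
    have hle : PySem.List.len x.2 ≤ T := hmax.2 x hx
    have h0 : 0 ≤ PySem.List.len x.2 := by simp [PySem.List.len]
    rw [hvals]
    rcases lt_or_ge (PySem.List.len x.2) 2 with h2 | h2
    · apply List.mem_append_right
      interval_cases h : (PySem.List.len x.2) <;> simp
    · apply List.mem_append_left
      apply List.mem_map.mpr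
      refine ⟨PySem.List.len x.2, ?_, rfl⟩
      rw [hRdef]
      apply List.mem_map.mpr
      refine ⟨(T - PySem.List.len x.2).toNat, List.mem_range.mpr (by omega), by omega⟩
  rw [pv_sorted_eq_flatMap (fun x => -(PySem.List.len x.2)) items vals hpw hcov]
  rw [PySem.List.foldl_ite_eq_foldl_filter]
  rw [List.filter_flatMap]
  rw [hvals, List.flatMap_append]
  have htail : List.flatMap (fun v =>
      List.filter (fun x => decide (2 ≤ PySem.List.len x.2))
        (List.filter (fun x => -(PySem.List.len x.2) == v) items)) [-1, 0] = [] := by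
    simp only [List.flatMap_cons, List.flatMap_nil, List.append_nil]
    rw [List.filter_eq_nil_iff.mpr, List.filter_eq_nil_iff.mpr, List.append_nil]
    · intro a ha
      have := List.of_mem_filter ha
      simp only [beq_iff_eq] at this
      simp only [decide_eq_true_eq]
      omega
    · intro a ha
      have := List.of_mem_filter ha
      simp only [beq_iff_eq] at this
      simp only [decide_eq_true_eq]
      omega
  rw [htail, List.append_nil]
  have hhead : List.flatMap (fun v =>
      List.filter (fun x => decide (2 ≤ PySem.List.len x.2))
        (List.filter (fun x => -(PySem.List.len x.2) == v) items)) (R.map Neg.neg)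
      = List.flatMap (fun f => items.filter (fun x => PySem.List.len x.2 == f)) R := by
    rw [List.flatMap_map]
    apply List.flatMap_congr
    intro f hf
    have hle2 : ∀ x ∈ items.filter (fun x => -(PySem.List.len x.2) == -f), PySem.List.len x.2 = f := by
      intro x hx
      have := List.of_mem_filter hx
      simp only [beq_iff_eq, neg_inj] at this
      exact this
    have hf2 : (2:Int) ≤ f := by
      have := (hRmem (-f) (List.mem_map.mpr ⟨f, hf, rfl⟩)).1
      omega
    rw [List.filter_eq_self.mpr (by
      intro a ha
      have := hle2 a ha
      simp only [decide_eq_true_eq]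
      omega)]
    apply List.filter_congr
    intro x _
    cases h : (PySem.List.len x.2 == f)
    · simp only [beq_eq_false_iff_ne] at h
      simp only [beq_eq_false_iff_ne, ne_eq]
      simpa [PySem.List.len] using h
    · simp only [beq_iff_eq] at h
      simp only [beq_iff_eq]
      simpa [PySem.List.len] using h
  rw [hhead]
  rw [pv_pyRange_desc, ← hRdef]
  rw [List.foldl_flatMap]
  apply PySem.List.foldl_congr_mem
  intro d f _
  rw [hbucket]

-- ===== VERDICT (by name: the statement is the Claim_ definition above) =====
theorem extract_discovery_tickers_py_spec : Claim_equal_extract_discovery_tickers_py := by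
  intro articles known_tickers _
  unfold Spec_extract_discovery_tickers_py
  simp only [extract_discovery_tickers_py, extract_discovery_tickers_py_alt]
  rw [pv_group_eq]
  exact congrArg PySem.Dict.items (pv_core _)
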